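-- pv_equiv track=rewrite | github.com/sangjun19/codetree-TILs | 240724/최적의 십자 모양 폭발/best-cross-shape-bomb.py | result_bomb
-- ===== SOURCE A (Python) =====
-- def calc_pair(arr):
--     cnt = 0
--     for i in range(len(arr)):
--         for j in range(len(arr)):
--             if arr[i][j] == 0:
--                 continue
--             if i != len(arr) - 1:
--                 if arr[i][j] == arr[i + 1][j]:
--                     cnt += 1
--             if j != len(arr) - 1:
--                 if arr[i][j] == arr[i][j + 1]:
--                     cnt += 1
--     return cnt
--
-- def result_bomb(arr):
--     for j in range(len(arr)):
--         save = -1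
--         for i in range(len(arr) - 1, -1, -1):
--             if save == -1 and arr[i][j] == 0:
--                 save = i
--             if arr[i][j] != 0 and save != -1:
--                 arr[save][j] = arr[i][j]
--                 arr[i][j] = 0
--                 save -= 1
--     return calc_pair(arr)
-- ===== SOURCE B (Python) =====
-- def result_bomb(arr):
--     n = len(arr)
--     for j in range(n):
--         vals = [arr[i][j] for i in range(n) if arr[i][j] != 0]
--         z = n - len(vals)
--         for i in range(n):
--             arr[i][j] = 0 if i < z else vals[i - z]
--     return sum(
--         (i + 1 < n and arr[i][j] == arr[i + 1][j])
--         + (j + 1 < n and arr[i][j] == arr[i][j + 1])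
--         for i in range(n) for j in range(n) if arr[i][j] != 0)
-- ===== Notes on version B (the rewrite author's own statement) =====
-- stated objective: simpler
-- what changed: Gravity per column is done by gathering the nonzero values and rewriting the whole column (zeros on top, values below) instead of the backward single-pointer in-place compaction, and the pair count is a single generator sum instead of nested accumulator loops.
import Mathlib
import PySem

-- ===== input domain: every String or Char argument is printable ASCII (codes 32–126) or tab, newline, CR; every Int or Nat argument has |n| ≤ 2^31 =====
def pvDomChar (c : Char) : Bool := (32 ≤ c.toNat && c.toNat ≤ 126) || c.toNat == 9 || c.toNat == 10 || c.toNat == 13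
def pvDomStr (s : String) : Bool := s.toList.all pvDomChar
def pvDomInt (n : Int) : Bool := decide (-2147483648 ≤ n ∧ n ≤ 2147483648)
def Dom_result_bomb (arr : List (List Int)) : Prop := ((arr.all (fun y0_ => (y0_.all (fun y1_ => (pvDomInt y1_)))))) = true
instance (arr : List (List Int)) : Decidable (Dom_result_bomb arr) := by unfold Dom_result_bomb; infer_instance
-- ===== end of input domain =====

-- B replaces A's backward save-pointer in-place column compaction by a gather-then-scatter
-- rewrite of each column and counts the adjacent equal pairs with a single generator sum
-- (objective: simpler).  Both Pythons mutate `arr` in place to the same final grid; the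
-- equivalence proved here is about the RETURN value.

-- ===== PORT A =====
-- arr[i][j] read; under Pre_ every index that occurs is nonnegative and in range, where
-- pyGetD is exact (Python would raise IndexError outside, excluded by Pre_).
def cellA (g : List (List Int)) (i j : Int) : Int :=
  PySem.List.pyGetD (PySem.List.pyGetD g i []) j 0

-- arr[i][j] = v; exact for the nonnegative in-range indices that occur under Pre_.
def setCellA (g : List (List Int)) (i j : Int) (v : Int) : List (List Int) :=
  g.set i.toNat ((PySem.List.pyGetD g i []).set j.toNat v)

-- body of A's inner 'for i in range(len(arr)-1,-1,-1)' loop; state = (arr, save)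
def stepA (j : Int) (st : List (List Int) × Int) (i : Int) : List (List Int) × Int :=
  let save := if st.2 = -1 ∧ cellA st.1 i j = 0 then i else st.2
  if cellA st.1 i j ≠ 0 ∧ save ≠ -1 then
    (setCellA (setCellA st.1 save j (cellA st.1 i j)) i j 0, save - 1)
  else (st.1, save)

def dropColA (g : List (List Int)) (j : Int) : List (List Int) :=
  ((PySem.List.pyRange ((g.length : Int) - 1) (-1) (-1)).foldl (stepA j) (g, -1)).1

def calcPairA (g : List (List Int)) : Int :=
  (PySem.List.pyRange 0 (g.length : Int) 1).foldl (fun cnt i =>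
    (PySem.List.pyRange 0 (g.length : Int) 1).foldl (fun cnt j =>
      if cellA g i j = 0 then cnt
      else
        let cnt := if i ≠ (g.length : Int) - 1 ∧ cellA g i j = cellA g (i + 1) j then cnt + 1 else cnt
        if j ≠ (g.length : Int) - 1 ∧ cellA g i j = cellA g i (j + 1) then cnt + 1 else cnt) cnt) 0

def result_bomb (arr : List (List Int)) : Int :=
  calcPairA ((PySem.List.pyRange 0 (arr.length : Int) 1).foldl dropColA arr)

-- ===== PORT B =====
-- vals = [arr[i][j] for i in range(n) if arr[i][j] != 0]
def gatherB (g : List (List Int)) (j : Int) : List Int :=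
  (PySem.List.pyRange 0 (g.length : Int) 1).filterMap (fun i =>
    if cellA g i j ≠ 0 then some (cellA g i j) else none)

-- for i in range(n): arr[i][j] = 0 if i < z else vals[i - z]
def scatterB (g : List (List Int)) (j : Int) : List (List Int) :=
  let vals := gatherB g j
  let z := (g.length : Int) - (vals.length : Int)
  (PySem.List.pyRange 0 (g.length : Int) 1).foldl
    (fun g i => setCellA g i j (if i < z then 0 else PySem.List.pyGetD vals (i - z) 0)) g

def calcPairB (g : List (List Int)) : Int :=
  ((PySem.List.pyRange 0 (g.length : Int) 1).flatMap (fun i =>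
    (PySem.List.pyRange 0 (g.length : Int) 1).filterMap (fun j =>
      if cellA g i j ≠ 0 then
        some ((if i + 1 < (g.length : Int) ∧ cellA g i j = cellA g (i + 1) j then (1 : Int) else 0) +
              (if j + 1 < (g.length : Int) ∧ cellA g i j = cellA g i (j + 1) then (1 : Int) else 0))
      else none))).sum

def result_bomb_alt (arr : List (List Int)) : Int :=
  calcPairB ((PySem.List.pyRange 0 (arr.length : Int) 1).foldl scatterB arr)

-- ===== PRECONDITION & SPEC =====
-- A reads arr[i][j] for every i, j < len(arr); it raises IndexError exactly when some row is
-- shorter than len(arr). Pre_ excludes exactly those inputs (B raises there too).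
def Pre_result_bomb (arr : List (List Int)) : Prop := ∀ row ∈ arr, arr.length ≤ row.length
instance (arr : List (List Int)) : Decidable (Pre_result_bomb arr) := by unfold Pre_result_bomb; infer_instance
def pvWitness_result_bomb : List (List Int) := [[1, 0], [0, 1]]

def Spec_result_bomb (arr : List (List Int)) (out : Int) : Prop := out = result_bomb_alt arr
instance (arr : List (List Int)) (out : Int) : Decidable (Spec_result_bomb arr out) := by unfold Spec_result_bomb; infer_instance

-- ===== CLAIM (what is proved, stated in full; the proofs are below) =====
def Claim_equal_result_bomb : Prop := ∀ (arr : List (List Int)), Dom_result_bomb arr → Pre_result_bomb arr → Spec_result_bomb arr (result_bomb arr)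

-- ===== LEMMAS AND PROOFS =====

-- Nat-index view of the cell primitives
def cellN (g : List (List Int)) (i j : Nat) : Int := (g.getD i []).getD j 0
def setN (g : List (List Int)) (i j : Nat) (v : Int) : List (List Int) :=
  g.set i ((g.getD i []).set j v)

theorem cellA_natCast (g : List (List Int)) (i j : Nat) : cellA g (i : Int) (j : Int) = cellN g i j := by
  simp [cellA, cellN, PySem.List.pyGetD_natCast]

theorem setCellA_natCast (g : List (List Int)) (i j : Nat) (v : Int) :
    setCellA g (i : Int) (j : Int) v = setN g i j v := by
  simp [setCellA, setN, PySem.List.pyGetD_natCast]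

-- the column j of g, as a list of length g.length
def colOf (g : List (List Int)) (j : Nat) : List Int :=
  (List.range g.length).map (fun i => cellN g i j)

def zc (s : List Int) : Nat := s.countP (· = 0)

-- A's column after the rows ≥ n have been compacted
def colspec (c : List Int) (n : Nat) : List Int :=
  c.take n ++ (List.replicate (zc (c.drop n)) 0 ++ (c.drop n).filter (· ≠ 0))

def saveOf (c : List Int) (n : Nat) : Int :=
  if zc (c.drop n) = 0 then -1 else (n : Int) + (zc (c.drop n) : Int) - 1

-- pointwise description of a grid g' that is g with column j replaced by L
def ColSpec (g g' : List (List Int)) (j : Nat) (L : List Int) : Prop :=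
  g'.length = g.length ∧ L.length = g.length ∧
  (∀ i, (g'.getD i []).length = (g.getD i []).length) ∧
  (∀ i j', j' ≠ j → cellN g' i j' = cellN g i j') ∧
  (∀ i, i < g.length → cellN g' i j = L.getD i 0)

theorem zc_add_filter (s : List Int) : zc s + (s.filter (· ≠ 0)).length = s.length := by
  induction s with
  | nil => rfl
  | cons a s ih =>
    by_cases h : a = 0 <;> simp [zc, h] at * <;> omega

theorem colspec_length (c : List Int) (n : Nat) (h : n ≤ c.length) :
    (colspec c n).length = c.length := by
  have := zc_add_filter (c.drop n)
  simp [colspec] at *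
  omega

theorem getElem_eq_getD {A : Type} (l : List A) (d : A) (i : Nat) (hi : i < l.length) :
    l[i] = l.getD i d := by
  rw [List.getD_eq_getElem?_getD, List.getElem?_eq_getElem hi]
  rfl

theorem getD_mem {A : Type} (l : List A) (d : A) (i : Nat) (hi : i < l.length) :
    l.getD i d ∈ l := by
  rw [← getElem_eq_getD l d i hi]; exact List.getElem_mem hi

theorem getD_set' (L : List Int) (i k : Nat) (v : Int) (hi : i < L.length) :
    (L.set i v).getD k 0 = if k = i then v else L.getD k 0 := by
  simp only [List.getD_eq_getElem?_getD, List.getElem?_set]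
  rcases eq_or_ne i k with rfl | h
  · simp [hi]
  · simp [h, Ne.symm h]

theorem getD_set_row (g : List (List Int)) (i i' : Nat) (r : List Int) :
    (g.set i r).getD i' [] = if i' = i ∧ i < g.length then r else g.getD i' [] := by
  simp only [List.getD_eq_getElem?_getD, List.getElem?_set]
  rcases eq_or_ne i i' with rfl | h
  · by_cases hlen : i < g.length
    · simp [hlen]
    · simp [hlen]
  · simp [h, Ne.symm h]

theorem pre_row (g : List (List Int)) (hp : Pre_result_bomb g) (i : Nat) (hi : i < g.length) :
    g.length ≤ (g.getD i []).length :=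
  hp _ (getD_mem g [] i hi)

theorem ColSpec_set (g g' : List (List Int)) (j : Nat) (L : List Int) (i : Nat) (v : Int)
    (hp : Pre_result_bomb g) (hj : j < g.length) (hi : i < g.length)
    (h : ColSpec g g' j L) : ColSpec g (setN g' i j v) j (L.set i v) := by
  obtain ⟨h1, h2, h3, h4, h5⟩ := h
  have hjr : ∀ i'', i'' < g.length → j < (g'.getD i'' []).length := by
    intro i'' hi''
    rw [h3]
    exact lt_of_lt_of_le hj (pre_row g hp i'' hi'')
  refine ⟨by simp [setN, h1], by simp [h2], ?_, ?_, ?_⟩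
  · intro i''
    show ((g'.set i _).getD i'' []).length = _
    rw [getD_set_row]
    split_ifs with hc
    · obtain ⟨rfl, _⟩ := hc
      rw [List.length_set]
      exact h3 i''
    · exact h3 i''
  · intro i'' j' hj'
    show ((g'.set i _).getD i'' []).getD j' 0 = _
    rw [getD_set_row]
    split_ifs with hc
    · obtain ⟨rfl, hlt⟩ := hc
      rw [getD_set' _ _ _ _ (hjr i'' (by omega)), if_neg hj']
      exact h4 i'' j' hj'
    · exact h4 i'' j' hj'
  · intro i'' hi''
    show ((g'.set i _).getD i'' []).getD j 0 = (L.set i v).getD i'' 0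
    rw [getD_set' L i i'' v (by omega), getD_set_row]
    split_ifs with hc hd he
    · obtain ⟨rfl, hlt⟩ := hc
      rw [getD_set' _ _ _ _ (hjr i'' (by omega)), if_pos rfl]
    · exact absurd hc.1 hd
    · exact absurd ⟨he, by omega⟩ hc
    · exact h5 i'' hi''

theorem ColSpec_unique (g g1 g2 : List (List Int)) (j : Nat) (L : List Int)
    (_hp : Pre_result_bomb g) (hj : j < g.length)
    (ha : ColSpec g g1 j L) (hb : ColSpec g g2 j L) : g1 = g2 := by
  obtain ⟨a1, a2, a3, a4, a5⟩ := ha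
  obtain ⟨b1, b2, b3, b4, b5⟩ := hb
  apply List.ext_getElem (by omega)
  intro i hi1 hi2
  have hig : i < g.length := by omega
  rw [getElem_eq_getD g1 [] i hi1, getElem_eq_getD g2 [] i hi2]
  apply List.ext_getElem (by rw [a3, b3])
  intro j' hj1 hj2
  rw [getElem_eq_getD _ 0 j' hj1, getElem_eq_getD _ 0 j' hj2]
  by_cases hjj : j' = j
  · subst hjj
    exact (a5 i hig).trans (b5 i hig).symm
  · exact (a4 i j' hjj).trans (b4 i j' hjj).symm

theorem ColSpec_pre (g g' : List (List Int)) (j : Nat) (L : List Int)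
    (hp : Pre_result_bomb g) (h : ColSpec g g' j L) :
    Pre_result_bomb g' ∧ g'.length = g.length := by
  obtain ⟨h1, _, h3, _, _⟩ := h
  refine ⟨?_, h1⟩
  intro row hrow
  obtain ⟨i, hi, rfl⟩ := List.getElem_of_mem hrow
  rw [getElem_eq_getD g' [] i hi, h1, h3]
  exact pre_row g hp i (by omega)

theorem colOf_getD (g : List (List Int)) (j i : Nat) (hi : i < g.length) :
    (colOf g j).getD i 0 = cellN g i j := by
  simp [colOf, List.getD_eq_getElem?_getD, hi]

theorem ColSpec_refl (g : List (List Int)) (j : Nat) :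
    ColSpec g g j (colOf g j) := by
  refine ⟨rfl, by simp [colOf], fun _ => rfl, fun _ _ _ => rfl, ?_⟩
  intro i hi
  rw [colOf_getD g j i hi]

-- ------- small list index lemmas -------

theorem getD_take (c : List Int) (m k : Nat) (h : k < m) : (c.take m).getD k 0 = c.getD k 0 := by
  simp [List.getD_eq_getElem?_getD, h]

theorem getD_append' (l1 l2 : List Int) (k : Nat) :
    (l1 ++ l2).getD k 0 = if k < l1.length then l1.getD k 0 else l2.getD (k - l1.length) 0 := by
  simp only [List.getD_eq_getElem?_getD, List.getElem?_append]
  split_ifs <;> rfl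

theorem getD_replicate (m k : Nat) : (List.replicate m (0 : Int)).getD k 0 = 0 := by
  simp only [List.getD_eq_getElem?_getD, List.getElem?_replicate]
  split_ifs <;> rfl

theorem take_succ_getD (c : List Int) (n : Nat) (h : n < c.length) :
    c.take (n + 1) = c.take n ++ [c.getD n 0] := by
  rw [List.take_add_one]
  congr 1
  rw [List.getElem?_eq_getElem h, ← getElem_eq_getD c 0 n h]
  rfl

theorem drop_cons_getD (c : List Int) (n : Nat) (h : n < c.length) :
    c.drop n = c.getD n 0 :: c.drop (n + 1) := by
  rw [List.drop_eq_getElem_cons h, getElem_eq_getD c 0 n h]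

theorem set_append_ge (l1 l2 : List Int) (i : Nat) (v : Int) (h : l1.length ≤ i) :
    (l1 ++ l2).set i v = l1 ++ l2.set (i - l1.length) v := by
  rw [List.set_append, if_neg (by omega)]

theorem set_append_lt (l1 l2 : List Int) (i : Nat) (v : Int) (h : i < l1.length) :
    (l1 ++ l2).set i v = l1.set i v ++ l2 := by
  rw [List.set_append, if_pos h]

theorem set_replicate_last (z : Nat) (v : Int) (h : 1 ≤ z) :
    (List.replicate z (0 : Int)).set (z - 1) v = List.replicate (z - 1) 0 ++ [v] := by
  induction z with
  | zero => omega
  | succ m ih =>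
    cases m with
    | zero => simp
    | succ k =>
      have ihk := ih (by omega)
      simp only [Nat.add_sub_cancel] at *
      rw [List.replicate_succ, List.set_cons_succ, ihk]
      rw [show List.replicate (k + 1) (0 : Int) = 0 :: List.replicate k 0 from List.replicate_succ ..]
      simp

theorem zc_cons (a : Int) (s : List Int) :
    zc (a :: s) = zc s + (if a = 0 then 1 else 0) := by
  by_cases h : a = 0 <;> simp [zc, h]

-- ------- rewriting A's single compaction step on the column -------

theorem colspec_step_zero (c : List Int) (n : Nat) (h : n < c.length) (hv : c.getD n 0 = 0) :
    colspec c n = colspec c (n + 1) := by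
  unfold colspec
  rw [drop_cons_getD c n h, hv, take_succ_getD c n h, hv, zc_cons]
  simp [List.replicate_succ, List.append_assoc]

theorem colspec_step_nz (c : List Int) (n : Nat) (h : n < c.length)
    (hv : c.getD n 0 ≠ 0) (hz : zc (c.drop (n + 1)) = 0) :
    colspec c n = colspec c (n + 1) := by
  unfold colspec
  rw [drop_cons_getD c n h, take_succ_getD c n h, zc_cons, hz, if_neg hv]
  rw [show (c.getD n 0 :: c.drop (n + 1)).filter (· ≠ 0) =
      c.getD n 0 :: (c.drop (n + 1)).filter (· ≠ 0) from by rw [List.filter_cons, if_pos (by simpa using hv)]]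
  simp [List.append_assoc]

theorem replicate_pred (z : Nat) (h : 1 ≤ z) :
    List.replicate z (0 : Int) = 0 :: List.replicate (z - 1) 0 := by
  rw [show z = (z - 1) + 1 from by omega]
  simp [List.replicate_succ]

theorem colspec_step_nz_pos (c : List Int) (n : Nat) (h : n < c.length)
    (hv : c.getD n 0 ≠ 0) (hz : 1 ≤ zc (c.drop (n + 1))) :
    ((colspec c (n + 1)).set (n + zc (c.drop (n + 1))) (c.getD n 0)).set n 0 = colspec c n := by
  have htk : (c.take n).length = n := by rw [List.length_take, Nat.min_eq_left (by omega)]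
  have hstep : colspec c (n + 1) =
      c.take n ++ ([c.getD n 0] ++ (List.replicate (zc (c.drop (n + 1))) 0 ++ (c.drop (n + 1)).filter (· ≠ 0))) := by
    unfold colspec
    rw [take_succ_getD c n h]
    simp [List.append_assoc]
  rw [hstep]
  rw [set_append_ge (c.take n) _ (n + zc (c.drop (n + 1))) _ (by rw [htk]; omega)]
  rw [show n + zc (c.drop (n + 1)) - (c.take n).length = zc (c.drop (n + 1)) from by rw [htk]; omega]
  rw [set_append_ge [c.getD n 0] _ (zc (c.drop (n + 1))) _ (by simpa using hz)]
  rw [show zc (c.drop (n + 1)) - [c.getD n 0].length = zc (c.drop (n + 1)) - 1 from by simp]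
  rw [set_append_lt (List.replicate (zc (c.drop (n + 1))) 0) _ (zc (c.drop (n + 1)) - 1) _
    (by rw [List.length_replicate]; omega)]
  rw [set_replicate_last _ _ hz]
  rw [set_append_ge (c.take n) _ n _ (le_of_eq htk)]
  rw [show n - (c.take n).length = 0 from by rw [htk]; omega]
  rw [List.singleton_append, List.set_cons_zero]
  have hrhs : colspec c n = c.take n ++ ((0 : Int) ::
      (List.replicate (zc (c.drop (n + 1)) - 1) 0 ++
        (c.getD n 0 :: (c.drop (n + 1)).filter (· ≠ 0)))) := by
    unfold colspec
    rw [drop_cons_getD c n h, zc_cons, if_neg hv]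
    rw [show (c.getD n 0 :: c.drop (n + 1)).filter (· ≠ 0) =
        c.getD n 0 :: (c.drop (n + 1)).filter (· ≠ 0) from by rw [List.filter_cons, if_pos (by simpa using hv)]]
    rw [Nat.add_zero, replicate_pred _ hz]
    simp
  rw [hrhs]
  simp [List.append_assoc]

-- ------- A-side: the descending loop establishes colspec -------

def InvA (g : List (List Int)) (j : Nat) (c : List Int) (n : Nat)
    (st : List (List Int) × Int) : Prop :=
  ColSpec g st.1 j (colspec c n) ∧ st.2 = saveOf c n

theorem stepA_inv (g : List (List Int)) (j : Nat) (c : List Int) (n : Nat)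
    (st : List (List Int) × Int)
    (hp : Pre_result_bomb g) (hj : j < g.length) (hc : c.length = g.length)
    (hn : n < g.length) (h : InvA g j c (n + 1) st) :
    InvA g j c n (stepA (j : Int) st (n : Nat)) := by
  obtain ⟨G, s⟩ := st
  obtain ⟨hcs, hsv⟩ := h
  have hcs : ColSpec g G j (colspec c (n + 1)) := hcs
  have hsv : s = saveOf c (n + 1) := hsv
  have hzdrop : zc (c.drop n) = zc (c.drop (n + 1)) + (if c.getD n 0 = 0 then 1 else 0) := by
    rw [drop_cons_getD c n (by omega), zc_cons]
  have hvread : cellA G (n : Int) (j : Int) = c.getD n 0 := by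
    rw [cellA_natCast]
    rw [hcs.2.2.2.2 n (by omega)]
    unfold colspec
    rw [getD_append', if_pos (by rw [List.length_take, Nat.min_eq_left (by omega)]; omega)]
    exact getD_take c (n + 1) n (by omega)
  have hzle : zc (c.drop (n + 1)) ≤ c.length - (n + 1) := by
    have h1 : zc (c.drop (n + 1)) ≤ (c.drop (n + 1)).length := List.countP_le_length
    have h2 : (c.drop (n + 1)).length = c.length - (n + 1) := by simp
    omega
  by_cases hv : c.getD n 0 = 0
  · have hv2 : (getElem? c n).getD 0 = 0 := by rw [← List.getD_eq_getElem?_getD]; exact hv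
    by_cases hz0 : zc (c.drop (n + 1)) = 0
    · have hs1 : s = -1 := by rw [hsv, saveOf, if_pos hz0]
      have hstep : stepA (j : Int) (G, s) (n : Nat) = (G, (n : Int)) := by
        simp [stepA, hvread, hv2, hs1]
      rw [hstep]
      refine ⟨?_, ?_⟩
      · show ColSpec g G j (colspec c n)
        rw [colspec_step_zero c n (by omega) hv]
        exact hcs
      · show (n : Int) = saveOf c n
        rw [saveOf, if_neg (by rw [hzdrop, if_pos hv]; omega), hzdrop, if_pos hv, hz0]
        push_cast
        ring
    · have hs1 : s = ((n + 1 : Nat) : Int) + (zc (c.drop (n + 1)) : Int) - 1 := by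
        rw [hsv, saveOf, if_neg hz0]
      have hsne : ¬ (s = -1) := by rw [hs1]; push_cast; omega
      have hstep : stepA (j : Int) (G, s) (n : Nat) = (G, s) := by
        simp [stepA, hvread, hv2, hsne]
      rw [hstep]
      refine ⟨?_, ?_⟩
      · show ColSpec g G j (colspec c n)
        rw [colspec_step_zero c n (by omega) hv]
        exact hcs
      · show s = saveOf c n
        rw [hs1, saveOf, if_neg (by rw [hzdrop, if_pos hv]; omega), hzdrop, if_pos hv]
        push_cast
        ring
  · have hv2 : (getElem? c n).getD 0 ≠ 0 := by rw [← List.getD_eq_getElem?_getD]; exact hv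
    by_cases hz0 : zc (c.drop (n + 1)) = 0
    · have hs1 : s = -1 := by rw [hsv, saveOf, if_pos hz0]
      have hstep : stepA (j : Int) (G, s) (n : Nat) = (G, s) := by
        simp [stepA, hvread, hv2, hs1]
      rw [hstep]
      refine ⟨?_, ?_⟩
      · show ColSpec g G j (colspec c n)
        rw [colspec_step_nz c n (by omega) hv hz0]
        exact hcs
      · show s = saveOf c n
        rw [hs1, saveOf, if_pos (by rw [hzdrop, if_neg hv]; omega)]
    · have hs1 : s = ((n + 1 : Nat) : Int) + (zc (c.drop (n + 1)) : Int) - 1 := by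
        rw [hsv, saveOf, if_neg hz0]
      have hsne : ¬ (s = -1) := by rw [hs1]; push_cast; omega
      have hstep : stepA (j : Int) (G, s) (n : Nat) =
          (setCellA (setCellA G s (j : Int) (cellA G (n : Int) (j : Int))) (n : Int) (j : Int) 0, s - 1) := by
        simp [stepA, hvread, hv2, hsne]
      rw [hstep]
      have hscast : s = ((n + zc (c.drop (n + 1)) : Nat) : Int) := by
        rw [hs1]; push_cast; ring
      refine ⟨?_, ?_⟩
      · show ColSpec g (setCellA (setCellA G s (j : Int) (cellA G (n : Int) (j : Int))) (n : Int) (j : Int) 0) j (colspec c n)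
        rw [hvread, hscast, setCellA_natCast, setCellA_natCast]
        have h1 := ColSpec_set g G j (colspec c (n + 1)) (n + zc (c.drop (n + 1))) (c.getD n 0)
          hp hj (by omega) hcs
        have h2 := ColSpec_set g _ j _ n (0 : Int) hp hj (by omega) h1
        rwa [colspec_step_nz_pos c n (by omega) hv (by omega)] at h2
      · show s - 1 = saveOf c n
        rw [hscast, saveOf, if_neg (by rw [hzdrop, if_neg hv]; omega), hzdrop, if_neg hv]
        push_cast
        ring

theorem loopA_range (g : List (List Int)) (j : Nat) (c : List Int)
    (hp : Pre_result_bomb g) (hj : j < g.length) (hc : c.length = g.length)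
    (hcol : c = colOf g j) :
    ∀ m, m ≤ g.length →
      InvA g j c (g.length - m)
        (((List.range m).foldl (fun st (k : Nat) => stepA (j : Int) st ((g.length : Int) - 1 - (k : Int))) (g, -1))) := by
  intro m
  induction m with
  | zero =>
    intro _
    have hcN : colspec c g.length = c := by
      unfold colspec
      rw [← hc, List.take_length, List.drop_length]
      simp [zc]
    refine ⟨?_, ?_⟩
    · show ColSpec g g j (colspec c (g.length - 0))
      rw [Nat.sub_zero, hcN, hcol]
      exact ColSpec_refl g j
    · show (-1 : Int) = saveOf c (g.length - 0)
      rw [Nat.sub_zero, saveOf, if_pos (by rw [← hc, List.drop_length]; simp [zc])]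
  | succ m ih =>
    intro hm
    rw [List.range_succ, List.foldl_append, List.foldl_cons, List.foldl_nil]
    have hcast : ((g.length : Int) - 1 - (m : Int)) = ((g.length - 1 - m : Nat) : Int) := by omega
    rw [hcast]
    have hprev := ih (by omega)
    rw [show g.length - m = (g.length - 1 - m) + 1 from by omega] at hprev
    have := stepA_inv g j c (g.length - 1 - m) _ hp hj hc (by omega) hprev
    rwa [show g.length - (m + 1) = g.length - 1 - m from by omega]

theorem dropColA_spec (g : List (List Int)) (j : Nat)
    (hp : Pre_result_bomb g) (hj : j < g.length) :
    ColSpec g (dropColA g (j : Int)) j (colspec (colOf g j) 0) := by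
  unfold dropColA
  rw [PySem.List.pyRange_neg_one]
  rw [show ((g.length : Int) - 1 - (-1)).toNat = g.length from by omega]
  rw [List.foldl_map]
  have := (loopA_range g j (colOf g j) hp hj (by simp [colOf]) rfl g.length (le_refl _)).1
  rwa [Nat.sub_self] at this

-- ------- B-side: the scatter loop establishes the same column -------

theorem gather_aux (l : List Nat) (f : Nat → Int) :
    l.filterMap (fun k => if f k = 0 then none else some (f k)) = (l.map f).filter (· ≠ 0) := by
  induction l with
  | nil => rfl
  | cons a l ih =>
    by_cases h : f a = 0
    · simp only [List.filterMap_cons, if_pos h, List.map_cons, List.filter_cons,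
        if_neg (by simp [h] : ¬ (decide (f a ≠ 0) = true))]
      exact ih
    · simp only [List.filterMap_cons, if_neg h, List.map_cons, List.filter_cons,
        if_pos (by simpa using h : decide (f a ≠ 0) = true)]
      rw [ih]

theorem gatherB_eq (g : List (List Int)) (j : Nat) :
    gatherB g (j : Int) = (colOf g j).filter (· ≠ 0) := by
  unfold gatherB
  rw [PySem.List.pyRange_one]
  simp only [sub_zero, Int.toNat_natCast, List.filterMap_map]
  rw [show ((fun i => if cellA g i (j : Int) ≠ 0 then some (cellA g i (j : Int)) else none) ∘
        (fun k : Nat => (0 : Int) + (k : Int))) =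
      (fun k : Nat => if cellN g k j = 0 then none else some (cellN g k j)) from by
    funext k
    by_cases hk : cellN g k j = 0 <;> simp [cellA_natCast, hk]]
  exact gather_aux (List.range g.length) (fun k => cellN g k j)

theorem take_drop_set (T c : List Int) (m : Nat) (hm : m < c.length) (hT : m < T.length) :
    (T.take m ++ c.drop m).set m (T.getD m 0) = T.take (m + 1) ++ c.drop (m + 1) := by
  have htk : (T.take m).length = m := by rw [List.length_take, Nat.min_eq_left (by omega)]
  rw [set_append_ge _ _ _ _ (le_of_eq htk)]
  rw [show m - (T.take m).length = 0 from by rw [htk]; omega]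
  rw [drop_cons_getD c m hm, List.set_cons_zero, take_succ_getD T m hT]
  simp

theorem loopB_gen (g : List (List Int)) (j : Nat) (w : Nat → Int) (T : List Int)
    (hp : Pre_result_bomb g) (hj : j < g.length) (hT : T.length = g.length)
    (hw : ∀ k, k < g.length → w k = T.getD k 0) :
    ∀ m, m ≤ g.length →
      ColSpec g ((List.range m).foldl (fun acc k => setN acc k j (w k)) g) j
        (T.take m ++ (colOf g j).drop m) := by
  intro m
  induction m with
  | zero =>
    intro _
    simp only [List.range_zero, List.foldl_nil, List.take_zero, List.drop_zero, List.nil_append]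
    exact ColSpec_refl g j
  | succ m ih =>
    intro hm
    rw [List.range_succ, List.foldl_append, List.foldl_cons, List.foldl_nil]
    have hprev := ih (by omega)
    have h1 := ColSpec_set g _ j _ m (w m) hp hj (by omega) hprev
    rw [show T.take (m + 1) ++ (colOf g j).drop (m + 1) =
        (T.take m ++ (colOf g j).drop m).set m (w m) from by
      rw [hw m (by omega)]
      exact (take_drop_set T (colOf g j) m (by simp [colOf]; omega) (by omega)).symm]
    exact h1

theorem scatterB_spec (g : List (List Int)) (j : Nat)
    (hp : Pre_result_bomb g) (hj : j < g.length) :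
    ColSpec g (scatterB g (j : Int)) j (colspec (colOf g j) 0) := by
  have hclen : (colOf g j).length = g.length := by simp [colOf]
  have hfl : ((colOf g j).filter (· ≠ 0)).length = g.length - zc (colOf g j) := by
    have := zc_add_filter (colOf g j)
    omega
  have hT0 : colspec (colOf g j) 0 =
      List.replicate (zc (colOf g j)) 0 ++ (colOf g j).filter (· ≠ 0) := by
    simp [colspec]
  have hTlen : (colspec (colOf g j) 0).length = g.length := by
    rw [colspec_length _ _ (by omega), hclen]
  have hzc : zc (colOf g j) ≤ g.length := by
    have h1 : zc (colOf g j) ≤ (colOf g j).length := List.countP_le_length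
    omega
  unfold scatterB
  rw [PySem.List.pyRange_one]
  simp only [sub_zero, Int.toNat_natCast, List.foldl_map, zero_add, setCellA_natCast]
  have := loopB_gen g j
      (fun k : Nat => if (k : Int) < (g.length : Int) - ((gatherB g (j : Int)).length : Int) then 0
        else PySem.List.pyGetD (gatherB g (j : Int)) ((k : Int) - ((g.length : Int) - ((gatherB g (j : Int)).length : Int))) 0)
      (colspec (colOf g j) 0) hp hj hTlen ?_ g.length (le_refl _)
  · rw [show (colspec (colOf g j) 0).take g.length = colspec (colOf g j) 0 from by
        rw [← hTlen]; exact List.take_length] at this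
    rw [show (colOf g j).drop g.length = [] from by rw [← hclen]; exact List.drop_length,
        List.append_nil] at this
    exact this
  · intro k hk
    beta_reduce
    have hglen : (gatherB g (j : Int)).length = g.length - zc (colOf g j) := by
      rw [gatherB_eq, hfl]
    by_cases hlt : k < zc (colOf g j)
    · rw [if_pos (by rw [hglen]; omega)]
      rw [hT0, getD_append', if_pos (by simp [List.length_replicate]; omega)]
      rw [getD_replicate]
    · rw [if_neg (by rw [hglen]; omega)]
      rw [show (k : Int) - ((g.length : Int) - ((gatherB g (j : Int)).length : Int)) =
          ((k - zc (colOf g j) : Nat) : Int) from by rw [hglen]; omega]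
      rw [PySem.List.pyGetD_natCast, gatherB_eq]
      rw [hT0, getD_append', if_neg (by simp [List.length_replicate]; omega)]
      rw [List.length_replicate]

theorem dropColA_eq_scatterB (g : List (List Int)) (j : Nat)
    (hp : Pre_result_bomb g) (hj : j < g.length) :
    dropColA g (j : Int) = scatterB g (j : Int) := by
  exact ColSpec_unique g _ _ j _ hp hj (dropColA_spec g j hp hj) (scatterB_spec g j hp hj)

-- ------- the outer fold over columns -------

theorem foldl_cols_eq (N : Nat) (js : List Nat) (g : List (List Int))
    (hp : Pre_result_bomb g) (hN : g.length = N) (hjs : ∀ j ∈ js, j < N) :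
    js.foldl (fun g (j : Nat) => dropColA g (j : Int)) g =
      js.foldl (fun g (j : Nat) => scatterB g (j : Int)) g := by
  induction js generalizing g with
  | nil => rfl
  | cons j js ih =>
    have hj : j < g.length := by rw [hN]; exact hjs j (by simp)
    have hsp := scatterB_spec g j hp hj
    have ⟨hp', hl'⟩ := ColSpec_pre g _ j _ hp hsp
    simp only [List.foldl_cons, dropColA_eq_scatterB g j hp hj]
    exact ih (scatterB g (j : Int)) hp' (by omega) (fun x hx => hjs x (by simp [hx]))

-- ------- the pair count -------

theorem sum_filterMap_ite (l : List Int) (p : Int → Prop) [DecidablePred p] (f : Int → Int) :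
    (l.filterMap (fun x => if p x then some (f x) else none)).sum =
      (l.map (fun x => if p x then f x else 0)).sum := by
  induction l with
  | nil => rfl
  | cons a l ih => by_cases h : p a <;> simp [h, ih]

theorem calcPair_eq (g : List (List Int)) : calcPairA g = calcPairB g := by
  unfold calcPairA calcPairB
  rw [List.flatMap_def, List.sum_flatten, List.map_map]
  have hb : ∀ i cnt : Int,
      ((PySem.List.pyRange 0 (g.length : Int) 1).foldl (fun cnt j =>
        if cellA g i j = 0 then cnt
        else
          let cnt := if i ≠ (g.length : Int) - 1 ∧ cellA g i j = cellA g (i + 1) j then cnt + 1 else cnt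
          if j ≠ (g.length : Int) - 1 ∧ cellA g i j = cellA g i (j + 1) then cnt + 1 else cnt) cnt) =
      cnt + ((PySem.List.pyRange 0 (g.length : Int) 1).map (fun j =>
        if cellA g i j = 0 then 0
        else (if i ≠ (g.length : Int) - 1 ∧ cellA g i j = cellA g (i + 1) j then (1 : Int) else 0)
           + (if j ≠ (g.length : Int) - 1 ∧ cellA g i j = cellA g i (j + 1) then (1 : Int) else 0))).sum := by
    intro i cnt
    rw [← PySem.List.foldl_add]
    congr 1
    funext acc j
    dsimp only
    split_ifs <;> ring
  simp only [hb]
  rw [PySem.List.foldl_add]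
  rw [zero_add]
  apply congrArg
  apply List.map_congr_left
  intro i hi
  obtain ⟨hi0, hiN⟩ := PySem.List.mem_pyRange_one.1 hi
  rw [Function.comp_apply,
    sum_filterMap_ite _ (fun x => ¬ (cellA g i x = 0)) _]
  apply congrArg
  apply List.map_congr_left
  intro j hj
  obtain ⟨hj0, hjN⟩ := PySem.List.mem_pyRange_one.1 hj
  by_cases h0 : cellA g i j = 0
  · simp [h0]
  · have e1 : (i ≠ (g.length : Int) - 1 ∧ cellA g i j = cellA g (i + 1) j) ↔
        (i + 1 < (g.length : Int) ∧ cellA g i j = cellA g (i + 1) j) :=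
      and_congr_left' (by constructor <;> intro <;> omega)
    have e2 : (j ≠ (g.length : Int) - 1 ∧ cellA g i j = cellA g i (j + 1)) ↔
        (j + 1 < (g.length : Int) ∧ cellA g i j = cellA g i (j + 1)) :=
      and_congr_left' (by constructor <;> intro <;> omega)
    simp [h0, e1, e2]

-- ------- assembling the verdict -------

theorem result_eq (arr : List (List Int)) (hp : Pre_result_bomb arr) :
    result_bomb arr = result_bomb_alt arr := by
  unfold result_bomb result_bomb_alt
  rw [calcPair_eq]
  apply congrArg
  rw [PySem.List.pyRange_one]
  simp only [sub_zero, Int.toNat_natCast, List.foldl_map, zero_add]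
  exact foldl_cols_eq arr.length (List.range arr.length) arr hp rfl
    (fun x hx => List.mem_range.1 hx)

-- ===== VERDICT (by name: the statement is the Claim_ definition above) =====
theorem result_bomb_spec : Claim_equal_result_bomb := by
  intro arr _ hp
  unfold Spec_result_bomb
  exact result_eq arr hp
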